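-- pv_equiv track=rewrite | github.com/asthagaur1/danfoss-bdd-automation | suites/SourceCode/lib/InputSheetParser/testInput.py | get_group_name_from_multi_level_group
-- ===== SOURCE A (Python) =====
-- def get_group_name_from_multi_level_group(groupName):
--     """
--     Returns group Name of dataGrid format.
--     :param groupName: Multi level group name. Example: "Main menu|Miscellaneous|Factory reset"
--     :return: GroupName of dataGrid format. Example: "Miscellaneous-Factory reset".
--
--     """
--     groupName = groupName.split('|')
--     grpName = ''
--     count = 0
--     for i in groupName:
--         if count == 0:
--             count = count + 1
--             continue
--         if count == 1:
--             grpName = i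
--             count = count + 1
--             continue
--         grpName = grpName + "-" + i
--
--     return grpName
-- ===== SOURCE B (Python) =====
-- def get_group_name_from_multi_level_group(groupName):
--     tail = groupName.partition('|')[2]
--     return tail.replace('|', '-')
-- ===== Notes on version B (the rewrite author's own statement) =====
-- stated objective: idiomatic
-- what changed: Replaces the split-into-list plus counter-driven accumulator loop with partition('|') taking the tail after the first pipe and a single replace('|','-') on it.
import Mathlib
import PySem

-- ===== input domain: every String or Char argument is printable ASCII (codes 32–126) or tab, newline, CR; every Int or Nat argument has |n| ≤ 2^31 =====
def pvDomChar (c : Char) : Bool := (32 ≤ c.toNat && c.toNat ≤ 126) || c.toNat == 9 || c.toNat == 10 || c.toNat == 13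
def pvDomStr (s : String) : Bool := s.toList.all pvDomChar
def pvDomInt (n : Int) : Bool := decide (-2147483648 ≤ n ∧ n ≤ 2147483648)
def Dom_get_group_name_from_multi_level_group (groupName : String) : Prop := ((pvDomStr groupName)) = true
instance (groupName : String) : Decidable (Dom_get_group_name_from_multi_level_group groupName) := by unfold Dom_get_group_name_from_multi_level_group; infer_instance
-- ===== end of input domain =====

-- B replaces A's split-into-list plus counter-driven accumulator loop with partition + replace (idiomatic; same cost).

-- ===== PORT A =====
def get_group_name_from_multi_level_group (groupName : String) : String :=
  -- groupName = groupName.split('|')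
  let segs := PySem.Chars.splitOn groupName.toList ['|']
  -- grpName = ''; count = 0; for i in groupName: ...
  let st := segs.foldl (fun (st : List Char × Int) i =>
      if st.2 = 0 then (st.1, st.2 + 1)
      else if st.2 = 1 then (i, st.2 + 1)
      else (st.1 ++ ['-'] ++ i, st.2)) ([], 0)
  String.ofList st.1

-- ===== PORT B =====
-- hand port of str.partition's third component (PySem has no partition): scan for the
-- first '|', return the tail after it, or '' when there is none — exact on all inputs
def pvPartTail : List Char → List Char
  | [] => []
  | c :: t => if c = '|' then t else pvPartTail t

def get_group_name_from_multi_level_group_alt (groupName : String) : String :=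
  String.ofList (PySem.Chars.replace (pvPartTail groupName.toList) ['|'] ['-'])

-- ===== PRECONDITION & SPEC =====
def Spec_get_group_name_from_multi_level_group (groupName : String) (out : String) : Prop := out = get_group_name_from_multi_level_group_alt groupName
instance (groupName : String) (out : String) : Decidable (Spec_get_group_name_from_multi_level_group groupName out) := by unfold Spec_get_group_name_from_multi_level_group; infer_instance

-- ===== CLAIM (what is proved, stated in full; the proofs are below) =====
def Claim_equal_get_group_name_from_multi_level_group : Prop := ∀ (groupName : String), Dom_get_group_name_from_multi_level_group groupName → Spec_get_group_name_from_multi_level_group groupName (get_group_name_from_multi_level_group groupName)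

-- ===== LEMMAS AND PROOFS =====

-- single-char substitution
def pvSwap (c : Char) : Char := if c = '|' then '-' else c

-- a simple structural characterisation of split('|')
def pvSplitC : List Char → List (List Char)
  | [] => [[]]
  | c :: t =>
    if c = '|' then [] :: pvSplitC t
    else
      match pvSplitC t with
      | [] => [[c]]
      | h :: r => (c :: h) :: r

-- '-'.join
def pvDashJoin : List (List Char) → List Char
  | [] => []
  | x :: xs => xs.foldl (fun g i => g ++ ['-'] ++ i) x

lemma pvSplitC_ne_nil (cs : List Char) : pvSplitC cs ≠ [] := by
  cases cs with
  | nil => simp [pvSplitC]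
  | cons c t =>
    simp only [pvSplitC]
    split_ifs
    · simp
    · cases h : pvSplitC t <;> simp

lemma replace_go_eq : ∀ (fuel : Nat) (l acc : List Char), l.length ≤ fuel →
    PySem.Chars.replace.go ['|'] ['-'] fuel l acc = acc.reverse ++ l.map pvSwap := by
  intro fuel
  induction fuel with
  | zero =>
    intro l acc h
    have : l = [] := by cases l <;> simp_all
    subst this
    simp [PySem.Chars.replace.go]
  | succ n ih =>
    intro l acc h
    cases l with
    | nil => simp [PySem.Chars.replace.go]
    | cons c t =>
      have ht : t.length ≤ n := Nat.le_of_succ_le_succ (by simpa using h)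
      by_cases hc : c = '|'
      · subst hc
        rw [show PySem.Chars.replace.go ['|'] ['-'] (n + 1) ('|' :: t) acc =
            PySem.Chars.replace.go ['|'] ['-'] n t (['-'].reverse ++ acc) from by
          simp [PySem.Chars.replace.go, List.isPrefixOf]]
        rw [ih t _ ht]
        simp [pvSwap]
      · rw [show PySem.Chars.replace.go ['|'] ['-'] (n + 1) (c :: t) acc =
            PySem.Chars.replace.go ['|'] ['-'] n t (c :: acc) from by
          simp [PySem.Chars.replace.go, List.isPrefixOf, Ne.symm hc]]
        rw [ih t _ ht]
        simp [pvSwap, hc]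

lemma replace_eq_map (l : List Char) :
    PySem.Chars.replace l ['|'] ['-'] = l.map pvSwap := by
  simp only [PySem.Chars.replace, List.isEmpty]
  rw [replace_go_eq l.length l [] le_rfl]
  simp

lemma splitOn_go_eq : ∀ (fuel : Nat) (l cur : List Char) (acc : List (List Char)),
    l.length ≤ fuel →
    PySem.Chars.splitOn.go ['|'] fuel l cur acc =
      acc.reverse ++ (match pvSplitC l with
        | [] => [cur.reverse]
        | h :: r => (cur.reverse ++ h) :: r) := by
  intro fuel
  induction fuel with
  | zero =>
    intro l cur acc h
    have : l = [] := by cases l <;> simp_all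
    subst this
    simp [PySem.Chars.splitOn.go, pvSplitC]
  | succ n ih =>
    intro l cur acc h
    cases l with
    | nil => simp [PySem.Chars.splitOn.go, pvSplitC]
    | cons c t =>
      have htl : t.length ≤ n := Nat.le_of_succ_le_succ (by simpa using h)
      by_cases hc : c = '|'
      · subst hc
        rw [show PySem.Chars.splitOn.go ['|'] (n + 1) ('|' :: t) cur acc =
            PySem.Chars.splitOn.go ['|'] n t [] (cur.reverse :: acc) from by
          simp [PySem.Chars.splitOn.go, List.isPrefixOf]]
        rw [ih t [] _ htl]
        cases ht : pvSplitC t with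
        | nil => exact absurd ht (pvSplitC_ne_nil t)
        | cons h' r => simp [pvSplitC, ht]
      · rw [show PySem.Chars.splitOn.go ['|'] (n + 1) (c :: t) cur acc =
            PySem.Chars.splitOn.go ['|'] n t (c :: cur) acc from by
          simp [PySem.Chars.splitOn.go, List.isPrefixOf, Ne.symm hc]]
        rw [ih t (c :: cur) acc htl]
        cases ht : pvSplitC t with
        | nil => exact absurd ht (pvSplitC_ne_nil t)
        | cons h' r => simp [pvSplitC, hc, ht]

lemma splitOn_eq (cs : List Char) :
    PySem.Chars.splitOn cs ['|'] = pvSplitC cs := by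
  simp only [PySem.Chars.splitOn]
  rw [splitOn_go_eq (cs.length + 1) cs [] [] (Nat.le_succ _)]
  cases h : pvSplitC cs with
  | nil => exact absurd h (pvSplitC_ne_nil cs)
  | cons h' r => simp

-- the dashed fold appends on the right of a fixed prefix
lemma foldl_dash_append (xs : List (List Char)) (a g : List Char) :
    xs.foldl (fun g i => g ++ ['-'] ++ i) (a ++ g) =
      a ++ xs.foldl (fun g i => g ++ ['-'] ++ i) g := by
  induction xs generalizing g with
  | nil => rfl
  | cons x xs ih =>
    rw [List.foldl_cons, List.foldl_cons,
      show (a ++ g) ++ ['-'] ++ x = a ++ (g ++ ['-'] ++ x) by simp]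
    exact ih (g ++ ['-'] ++ x)

lemma pvDashJoin_cons (x h : List Char) (r : List (List Char)) :
    pvDashJoin (x :: h :: r) = x ++ ['-'] ++ pvDashJoin (h :: r) := by
  show (h :: r).foldl (fun g i => g ++ ['-'] ++ i) x = _
  rw [List.foldl_cons]
  have : x ++ ['-'] ++ h = (x ++ ['-']) ++ h := by simp
  rw [this, foldl_dash_append r (x ++ ['-']) h]
  simp [pvDashJoin]

-- '-'.join of ALL the segments is the pipe→dash substitution
lemma join_splitC (u : List Char) :
    pvDashJoin (pvSplitC u) = u.map pvSwap := by
  induction u with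
  | nil => simp [pvSplitC, pvDashJoin]
  | cons c t ih =>
    cases ht : pvSplitC t with
    | nil => exact absurd ht (pvSplitC_ne_nil t)
    | cons h r =>
      rw [ht] at ih
      by_cases hc : c = '|'
      · subst hc
        simp only [pvSplitC, if_true, ht]
        rw [pvDashJoin_cons [] h r, ih]
        simp [pvSwap]
      · simp only [pvSplitC, hc, if_false, ht]
        cases r with
        | nil =>
          simp only [pvDashJoin, List.foldl_nil] at ih ⊢
          simp [pvSwap, hc, ih]
        | cons x xs =>
          rw [pvDashJoin_cons (c :: h) x xs]
          rw [pvDashJoin_cons h x xs] at ih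
          simp only [List.map, pvSwap, if_neg hc]
          rw [← ih]
          simp
      
-- dropping the first segment and joining = substitution applied to the tail after the first '|'
lemma tail_join (cs : List Char) :
    pvDashJoin (pvSplitC cs).tail = (pvPartTail cs).map pvSwap := by
  induction cs with
  | nil => simp [pvSplitC, pvPartTail, pvDashJoin]
  | cons c t ih =>
    cases ht : pvSplitC t with
    | nil => exact absurd ht (pvSplitC_ne_nil t)
    | cons h r =>
      by_cases hc : c = '|'
      · subst hc
        simp only [pvSplitC, if_true, ht, List.tail_cons, pvPartTail]
        rw [← ht, join_splitC]
      · simp only [pvSplitC, hc, if_false, ht, List.tail_cons, pvPartTail]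
        rw [ht, List.tail_cons] at ih
        simpa [hc] using ih

-- A's fold once the counter has reached 2
lemma foldl_count2 (xs : List (List Char)) (g : List Char) :
    xs.foldl (fun (st : List Char × Int) i =>
      if st.2 = 0 then (st.1, st.2 + 1)
      else if st.2 = 1 then (i, st.2 + 1)
      else (st.1 ++ ['-'] ++ i, st.2)) (g, 2) =
    (xs.foldl (fun g i => g ++ ['-'] ++ i) g, 2) := by
  induction xs generalizing g with
  | nil => rfl
  | cons x xs ih =>
    rw [List.foldl_cons, List.foldl_cons]
    split_ifs with h1 h2
    · exact absurd h1 (by simp)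
    · exact absurd h2 (by simp)
    · exact ih (g ++ ['-'] ++ x)

-- A's whole loop over the split computes the dash-join of the tail segments
lemma foldlA_eq (h : List Char) (r : List (List Char)) :
    (((h :: r).foldl (fun (st : List Char × Int) i =>
      if st.2 = 0 then (st.1, st.2 + 1)
      else if st.2 = 1 then (i, st.2 + 1)
      else (st.1 ++ ['-'] ++ i, st.2)) ([], 0))).1 = pvDashJoin r := by
  rw [List.foldl_cons]
  show (r.foldl (fun (st : List Char × Int) i =>
      if st.2 = 0 then (st.1, st.2 + 1)
      else if st.2 = 1 then (i, st.2 + 1)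
      else (st.1 ++ ['-'] ++ i, st.2)) (([] : List Char), (1 : Int))).1 = pvDashJoin r
  cases r with
  | nil => rfl
  | cons x xs =>
    rw [List.foldl_cons]
    show (xs.foldl (fun (st : List Char × Int) i =>
        if st.2 = 0 then (st.1, st.2 + 1)
        else if st.2 = 1 then (i, st.2 + 1)
        else (st.1 ++ ['-'] ++ i, st.2)) (x, (2 : Int))).1 = pvDashJoin (x :: xs)
    rw [foldl_count2]
    rfl

-- ===== VERDICT (by name: the statement is the Claim_ definition above) =====
theorem get_group_name_from_multi_level_group_spec : Claim_equal_get_group_name_from_multi_level_group := by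
  intro groupName _
  unfold Spec_get_group_name_from_multi_level_group
  unfold get_group_name_from_multi_level_group get_group_name_from_multi_level_group_alt
  simp only [replace_eq_map, splitOn_eq]
  cases ht : pvSplitC groupName.toList with
  | nil => exact absurd ht (pvSplitC_ne_nil _)
  | cons h r =>
    rw [foldlA_eq h r]
    have := tail_join groupName.toList
    rw [ht, List.tail_cons] at this
    rw [this]
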